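-- pv_equiv track=rewrite | github.com/MrBrantCode/unitest_baseline | mut_generate/mist_train_cf/cf_77548/solution.py | transpose_log_groups
-- ===== SOURCE A (Python) =====
-- def transpose_log_groups(log_entries):
--     """
--     This function takes a list of log entries, splits them into groups based on the delimiter "__________",
--     and transposes each group into a list.
--
--     Args:
--         log_entries (list): A list of log entries.
--
--     Returns:
--         list: A list of lists, where each sublist contains log entries between the delimiters.
--     """
--
--     groups = []
--     group = []
--     for entry in log_entries:
--         if entry == "__________":
--             if group:
--                 groups.append(list(zip(*group)))
--                 group = []
--         else:
--             group.append(entry.split())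
--     if group:
--         groups.append(list(zip(*group)))
--     return groups
-- ===== SOURCE B (Python) =====
-- def transpose_log_groups(log_entries):
--     # Phase 1: partition into maximal runs of non-delimiter entries.
--     runs = []
--     i, n = 0, len(log_entries)
--     while i < n:
--         if log_entries[i] == "__________":
--             i += 1
--             continue
--         j = i
--         while j < n and log_entries[j] != "__________":
--             j += 1
--         runs.append(log_entries[i:j])
--         i = j
--     # Phase 2: transpose each run.
--     return [list(zip(*(e.split() for e in run))) for run in runs]
-- ===== Notes on version B (the rewrite author's own statement) =====
-- stated objective: alternative
-- what changed: Replaced A's single stateful accumulator loop (flushing a pending group at each delimiter and at the end) by two phases: first partition the entries into maximal non-delimiter runs, then map each run to its whitespace-split transpose.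
import Mathlib
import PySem

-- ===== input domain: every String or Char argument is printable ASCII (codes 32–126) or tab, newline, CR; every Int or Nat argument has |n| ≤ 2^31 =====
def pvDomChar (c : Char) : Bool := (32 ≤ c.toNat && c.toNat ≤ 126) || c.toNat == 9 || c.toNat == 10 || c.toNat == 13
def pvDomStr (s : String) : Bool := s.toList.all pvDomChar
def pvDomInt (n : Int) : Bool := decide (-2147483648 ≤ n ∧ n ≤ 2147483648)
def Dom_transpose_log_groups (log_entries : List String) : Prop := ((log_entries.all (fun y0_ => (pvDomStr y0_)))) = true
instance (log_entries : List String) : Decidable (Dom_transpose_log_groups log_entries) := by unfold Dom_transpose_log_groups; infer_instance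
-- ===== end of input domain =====

-- B replaces A's single stateful accumulator loop by two phases (partition into
-- non-delimiter runs, then map each run to its transpose); alternative decomposition,
-- same cost. Return values only; neither program mutates its argument.

-- shared rendering of Python's builtin zip(*rows): truncates at the shortest row
def pyZip (rows : List (List String)) : List (List String) :=
  match rows with
  | [] => []
  | r0 :: rest =>
    if h1 : (r0 :: rest).all (fun r => !r.isEmpty) then
      (r0 :: rest).map (fun r => r.headD "") :: pyZip ((r0 :: rest).map (fun r => r.tail))
    else []
termination_by (rows.headD []).length
decreasing_by
  simp only [List.all_cons, Bool.and_eq_true, Bool.not_eq_true', List.isEmpty_eq_false_iff] at h1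
  simp only [List.map_cons, List.headD_cons]
  cases r0 with
  | nil => exact absurd rfl h1.1
  | cons a t => simp

-- ===== PORT A =====
-- A's loop body: flush the pending group at a delimiter, else append the split entry
def aStep (st : List (List (List String)) × List (List String)) (entry : String) :
    List (List (List String)) × List (List String) :=
  if entry = "__________" then
    (if st.2 ≠ [] then (st.1 ++ [pyZip st.2], ([] : List (List String))) else st)
  else (st.1, st.2 ++ [PySem.Str.split₀ entry])

def transpose_log_groups (log_entries : List String) : List (List (List String)) :=
  let st := log_entries.foldl aStep ([], [])
  if st.2 ≠ [] then st.1 ++ [pyZip st.2] else st.1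

-- ===== PORT B =====
-- phase 1 of Source B: maximal runs of non-delimiter entries (inner index scan = take/dropWhile)
def bRuns (xs : List String) : List (List String) :=
  match xs with
  | [] => []
  | x :: rest =>
    if x = "__________" then bRuns rest
    else (x :: rest.takeWhile (fun e => !(e == "__________"))) ::
         bRuns (rest.dropWhile (fun e => !(e == "__________")))
termination_by xs.length
decreasing_by
  · simp
  · have := List.length_dropWhile_le (p := fun e => !(e == "__________")) rest
    simp; omega

def transpose_log_groups_alt (log_entries : List String) : List (List (List String)) :=
  (bRuns log_entries).map (fun run => pyZip (run.map PySem.Str.split₀))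

-- ===== PRECONDITION & SPEC =====
def Spec_transpose_log_groups (log_entries : List String) (out : List (List (List String))) : Prop := out = transpose_log_groups_alt log_entries
instance (log_entries : List String) (out : List (List (List String))) : Decidable (Spec_transpose_log_groups log_entries out) := by unfold Spec_transpose_log_groups; infer_instance

-- ===== CLAIM (what is proved, stated in full; the proofs are below) =====
def Claim_equal_transpose_log_groups : Prop := ∀ (log_entries : List String), Dom_transpose_log_groups log_entries → Spec_transpose_log_groups log_entries (transpose_log_groups log_entries)

-- ===== LEMMAS AND PROOFS =====

-- A's accumulator loop, abstracted: runs still to come when a partial group g is pending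
def runsFrom (g : List String) (xs : List String) : List (List String) :=
  match xs with
  | [] => if g = [] then [] else [g]
  | x :: rest =>
    if x = "__________" then (if g = [] then runsFrom [] rest else g :: runsFrom [] rest)
    else runsFrom (g ++ [x]) rest

lemma split_map_nil_iff (g : List String) : g.map PySem.Str.split₀ = [] ↔ g = [] := by
  cases g <;> simp

lemma fold_finish (xs : List String) : ∀ (groups : List (List (List String))) (g : List String),
    (let st := xs.foldl aStep (groups, g.map PySem.Str.split₀);
      if st.2 ≠ [] then st.1 ++ [pyZip st.2] else st.1)
    = groups ++ (runsFrom g xs).map (fun run => pyZip (run.map PySem.Str.split₀)) := by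
  induction xs with
  | nil =>
    intro groups g
    by_cases hg : g = [] <;> simp [runsFrom, hg]
  | cons x rest ih =>
    intro groups g
    simp only [List.foldl_cons, runsFrom]
    by_cases hx : x = "__________"
    · by_cases hg : g = []
      · simpa [aStep, hx, hg] using ih groups []
      · have h2 : g.map PySem.Str.split₀ ≠ [] := by simpa [split_map_nil_iff] using hg
        have := ih (groups ++ [pyZip (g.map PySem.Str.split₀)]) []
        simp only [List.map_nil] at this
        simp [aStep, hx, hg, h2, this]
    · have := ih groups (g ++ [x])
      simp only [List.map_append, List.map_cons, List.map_nil] at this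
      simp [aStep, hx, this]

-- runsFrom agrees with Source B's two-phase run partition
lemma runsFrom_eq_bRuns (xs : List String) :
    runsFrom [] xs = bRuns xs ∧
    ∀ g : List String, g ≠ [] →
      runsFrom g xs = (g ++ xs.takeWhile (fun e => !(e == "__________")))
                        :: bRuns (xs.dropWhile (fun e => !(e == "__________"))) := by
  induction xs with
  | nil =>
    refine ⟨by simp [runsFrom, bRuns], fun g hg => ?_⟩
    simp [runsFrom, hg, bRuns]
  | cons x rest ih =>
    by_cases hx : x = "__________"
    · refine ⟨?_, fun g hg => ?_⟩
      · simp [runsFrom, bRuns, hx, ih.1]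
      · simp [runsFrom, bRuns, hx, hg, ih.1]
    · refine ⟨?_, fun g hg => ?_⟩
      · rw [runsFrom, if_neg hx]
        simp only [List.nil_append]
        rw [ih.2 [x] (by simp), bRuns]
        simp [hx]
      · rw [runsFrom, if_neg hx, ih.2 (g ++ [x]) (by simp)]
        simp [hx]

-- ===== VERDICT (by name: the statement is the Claim_ definition above) =====
theorem transpose_log_groups_spec : Claim_equal_transpose_log_groups := by
  intro xs _
  unfold Spec_transpose_log_groups transpose_log_groups transpose_log_groups_alt
  have h := fold_finish xs [] []
  simp only [List.map_nil] at h
  rw [h, (runsFrom_eq_bRuns xs).1]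
  simp
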